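-- pv_equiv track=rewrite | github.com/SanjeevaRDodlapati/QeMLflow | tools/linting/safe_auto_fix.py | _find_preceding_function
-- ===== SOURCE A (Python) =====
-- from typing import Dict, List, Optional, Set, Tuple, Union
--
-- def _find_preceding_function(
--     lines: List[str], line_idx: int
-- ) -> Optional[int]:
--     """Find the most recent function definition before the given line."""
--     for i in range(line_idx - 1, -1, -1):
--         line = lines[i].strip()
--         if line.startswith("def ") and line.endswith(":"):
--             return i
--     return None
-- ===== SOURCE B (Python) =====
-- from typing import Dict, List, Optional, Set, Tuple, Union
--
-- def _find_preceding_function(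
--     lines: List[str], line_idx: int
-- ) -> Optional[int]:
--     """Forward scan: remember the last 'def' line seen before line_idx."""
--     result = None
--     for i in range(line_idx):
--         s = lines[i].strip()
--         if s.startswith("def ") and s.endswith(":"):
--             result = i
--     return result
-- ===== Notes on version B (the rewrite author's own statement) =====
-- stated objective: alternative
-- what changed: Replaces the backward scan with early return by a forward scan over range(line_idx) that keeps the last matching def index and returns it after the loop.
import Mathlib
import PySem

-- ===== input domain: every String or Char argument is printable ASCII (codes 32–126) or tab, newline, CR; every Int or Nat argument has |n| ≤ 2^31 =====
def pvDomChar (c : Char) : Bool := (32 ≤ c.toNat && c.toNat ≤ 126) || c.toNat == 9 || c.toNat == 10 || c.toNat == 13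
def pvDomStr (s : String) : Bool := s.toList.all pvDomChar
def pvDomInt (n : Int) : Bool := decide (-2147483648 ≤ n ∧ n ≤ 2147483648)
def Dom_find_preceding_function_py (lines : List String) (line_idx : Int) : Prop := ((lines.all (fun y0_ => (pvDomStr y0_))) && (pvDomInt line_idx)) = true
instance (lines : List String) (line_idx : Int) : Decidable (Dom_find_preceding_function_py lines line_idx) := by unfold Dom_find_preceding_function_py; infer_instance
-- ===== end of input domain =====

-- B replaces A's backward scan (early return) with a forward scan keeping the last matching def index; same cost.

-- ===== PORT A =====
-- test of 'line.strip().startswith("def ") and line.strip().endswith(":")'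
def pvIsDef (line : String) : Bool :=
  let line := PySem.Str.strip line
  PySem.Str.startswith line "def " && PySem.Str.endswith line ":"

-- the backward for-loop with early return, over range(line_idx - 1, -1, -1)
def pvGoA (lines : List String) : List Int → Option Int
  | [] => none
  | i :: rest =>
    if pvIsDef (PySem.List.pyGetD lines i "") then some i
    else pvGoA lines rest

def find_preceding_function_py (lines : List String) (line_idx : Int) : Option Int :=
  pvGoA lines (PySem.List.pyRange (line_idx - 1) (-1) (-1))

-- ===== PORT B =====
def find_preceding_function_py_alt (lines : List String) (line_idx : Int) : Option Int :=
  (PySem.List.pyRange 0 line_idx 1).foldl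
    (fun acc i => if pvIsDef (PySem.List.pyGetD lines i "") then some i else acc)
    none

-- ===== PRECONDITION & SPEC =====
-- Python A raises IndexError when line_idx > len(lines) (and so does B); excluded.
def Pre_find_preceding_function_py (lines : List String) (line_idx : Int) : Prop :=
  line_idx ≤ (lines.length : Int)
instance (lines : List String) (line_idx : Int) : Decidable (Pre_find_preceding_function_py lines line_idx) := by
  unfold Pre_find_preceding_function_py; infer_instance
def pvWitness_find_preceding_function_py : List String × Int := (["def f():", "x = 1"], 2)

def Spec_find_preceding_function_py (lines : List String) (line_idx : Int) (out : Option Int) : Prop := out = find_preceding_function_py_alt lines line_idx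
instance (lines : List String) (line_idx : Int) (out : Option Int) : Decidable (Spec_find_preceding_function_py lines line_idx out) := by unfold Spec_find_preceding_function_py; infer_instance

-- ===== CLAIM (what is proved, stated in full; the proofs are below) =====
def Claim_equal_find_preceding_function_py : Prop := ∀ (lines : List String) (line_idx : Int), Dom_find_preceding_function_py lines line_idx → Pre_find_preceding_function_py lines line_idx → Spec_find_preceding_function_py lines line_idx (find_preceding_function_py lines line_idx)

-- ===== LEMMAS AND PROOFS =====

-- A's early-return loop is List.find? over the index list
theorem pvGoA_eq_find? (lines : List String) (l : List Int) :
    pvGoA lines l = l.find? (fun i => pvIsDef (PySem.List.pyGetD lines i "")) := by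
  induction l with
  | nil => rfl
  | cons i rest ih =>
    simp only [pvGoA, List.find?]
    split_ifs with h
    · simp [h]
    · simp [h, ih]

-- B's keep-the-last foldl is List.find? over the reversed list
theorem pvFoldl_eq_find?_reverse {α : Type} (p : α → Bool) (l : List α) (acc : Option α) :
    l.foldl (fun acc x => if p x then some x else acc) acc
      = (l.reverse.find? p).or acc := by
  induction l generalizing acc with
  | nil => rfl
  | cons x xs ih =>
    simp only [List.foldl_cons, List.reverse_cons, List.find?_append, ih]
    cases hf : xs.reverse.find? p with
    | some v => simp [Option.or]
    | none =>
      simp only [Option.or, List.find?]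
      split_ifs with h <;> simp [h]

-- ===== VERDICT (by name: the statement is the Claim_ definition above) =====
theorem find_preceding_function_py_spec : Claim_equal_find_preceding_function_py := by
  intro lines line_idx _ _
  unfold Spec_find_preceding_function_py find_preceding_function_py find_preceding_function_py_alt
  rw [pvGoA_eq_find?, pvFoldl_eq_find?_reverse,
      PySem.List.pyRange_neg_one_eq_reverse]
  have : line_idx - 1 + 1 = line_idx := by omega
  simp [this]
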